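-- pv_equiv track=rewrite | github.com/txnixhq/AI-Project-3 | pr3Bonus.py | count_color_transitions
-- ===== SOURCE A (Python) =====
-- def count_color_transitions(diagram):
--     row_transitions = [0] * len(diagram)
--     col_transitions = [0] * len(diagram[0])
--
--     # Count transitions in rows
--     for i, row in enumerate(diagram):
--         for j in range(1, len(row)):
--             if row[j] != row[j-1]:
--                 row_transitions[i] += 1
--
--     # Count transitions in columns
--     for j in range(len(diagram[0])):
--         for i in range(1, len(diagram)):
--             if diagram[i][j] != diagram[i-1][j]:
--                 col_transitions[j] += 1
--
--     return row_transitions + col_transitions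
-- ===== SOURCE B (Python) =====
-- def count_color_transitions(diagram):
--     w = len(diagram[0])
--     col_t = [0] * w
--     row_t = []
--     prev = None
--     for row in diagram:
--         r = 0
--         p = None
--         for j, c in enumerate(row):
--             if p is not None and c != p:
--                 r += 1
--             if prev is not None and j < w and c != prev[j]:
--                 col_t[j] += 1
--             p = c
--         row_t.append(r)
--         prev = row
--     return row_t + col_t
-- ===== Notes on version B (the rewrite author's own statement) =====
-- stated objective: faster
-- what changed: Replaces A's two staged traversals (a row-major index pass for row transitions, then a column-major index pass re-indexing diagram[i][j]) with one fused single pass over the rows that carries the previous row and a previous-cell variable and updates the row counter and all per-column counters together; the grid is traversed once, in memory order, with no repeated indexing into the outer list.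
import Mathlib
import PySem

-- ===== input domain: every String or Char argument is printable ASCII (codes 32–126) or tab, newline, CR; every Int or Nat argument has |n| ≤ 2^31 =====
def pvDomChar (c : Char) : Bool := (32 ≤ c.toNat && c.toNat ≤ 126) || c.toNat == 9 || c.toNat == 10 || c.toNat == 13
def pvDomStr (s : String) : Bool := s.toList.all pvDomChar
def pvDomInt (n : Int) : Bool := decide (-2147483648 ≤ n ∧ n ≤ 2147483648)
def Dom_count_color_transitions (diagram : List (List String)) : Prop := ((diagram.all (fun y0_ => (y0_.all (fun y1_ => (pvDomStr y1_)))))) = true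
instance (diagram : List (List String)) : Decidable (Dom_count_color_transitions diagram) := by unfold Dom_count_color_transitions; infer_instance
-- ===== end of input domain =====

-- B fuses A's two staged traversals into one pass over the rows that carries the previous
-- row and a previous-cell variable and updates both counter families together (objective:
-- faster by a constant factor in a timing run: one memory-order traversal).

-- ===== PORT A =====
def count_color_transitions (diagram : List (List String)) : List Int :=
  let row_transitions := List.replicate diagram.length (0 : Int)
  let col_transitions := List.replicate (PySem.List.pyGetD diagram 0 []).length (0 : Int)
  let row_transitions :=
    (PySem.List.enumerate diagram 0).foldl (fun rt p =>
      (PySem.List.pyRange 1 (p.2.length : Int) 1).foldl (fun rt j =>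
        if PySem.List.pyGetD p.2 j "" ≠ PySem.List.pyGetD p.2 (j-1) "" then
          rt.set p.1.toNat (rt.getD p.1.toNat 0 + 1)
        else rt) rt) row_transitions
  let col_transitions :=
    (PySem.List.pyRange 0 ((PySem.List.pyGetD diagram 0 []).length : Int) 1).foldl (fun ct j =>
      (PySem.List.pyRange 1 (diagram.length : Int) 1).foldl (fun ct i =>
        if PySem.List.pyGetD (PySem.List.pyGetD diagram i []) j "" ≠
           PySem.List.pyGetD (PySem.List.pyGetD diagram (i-1) []) j "" then
          ct.set j.toNat (ct.getD j.toNat 0 + 1)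
        else ct) ct) col_transitions
  row_transitions ++ col_transitions

-- ===== PORT B =====
-- inner loop body of Source B: state (r, p, col_t), item (j, c)
def bInnerStep (w : Nat) (prev : Option (List String))
    (st : Int × Option String × List Int) (it : Int × String) : Int × Option String × List Int :=
  let r := match st.2.1 with
    | some pc => if it.2 ≠ pc then st.1 + 1 else st.1
    | none => st.1
  let ct := match prev with
    | some pr =>
        if it.1 < (w : Int) ∧ it.2 ≠ PySem.List.pyGetD pr it.1 "" then
          st.2.2.set it.1.toNat (st.2.2.getD it.1.toNat 0 + 1)
        else st.2.2
    | none => st.2.2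
  (r, some it.2, ct)

def count_color_transitions_alt (diagram : List (List String)) : List Int :=
  let w := (PySem.List.pyGetD diagram 0 []).length
  let res := diagram.foldl (fun st row =>
      let inner := (PySem.List.enumerate row 0).foldl (bInnerStep w st.1) (0, none, st.2.2)
      (some row, st.2.1 ++ [inner.1], inner.2.2))
    ((none : Option (List String)), ([] : List Int), List.replicate w (0 : Int))
  res.2.1 ++ res.2.2

-- ===== PRECONDITION & SPEC =====
-- Pre_ excludes exactly the inputs where Python A raises IndexError: the empty diagram
-- (diagram[0]) and ragged diagrams with a row shorter than the first row (diagram[i][j]).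
def Pre_count_color_transitions (diagram : List (List String)) : Prop :=
  diagram ≠ [] ∧ ∀ row ∈ diagram, (diagram.headD []).length ≤ row.length
instance (diagram : List (List String)) : Decidable (Pre_count_color_transitions diagram) := by
  unfold Pre_count_color_transitions; infer_instance
def pvWitness_count_color_transitions : List (List String) := [["a", "b"], ["a", "a"]]
def Spec_count_color_transitions (diagram : List (List String)) (out : List Int) : Prop := out = count_color_transitions_alt diagram
instance (diagram : List (List String)) (out : List Int) : Decidable (Spec_count_color_transitions diagram out) := by unfold Spec_count_color_transitions; infer_instance

-- ===== CLAIM (what is proved, stated in full; the proofs are below) =====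
def Claim_equal_count_color_transitions : Prop := ∀ (diagram : List (List String)), Dom_count_color_transitions diagram → Pre_count_color_transitions diagram → Spec_count_color_transitions diagram (count_color_transitions diagram)

-- ===== LEMMAS AND PROOFS =====

-- the common canonical value both ports are reduced to
def canonRow (row : List String) : Int :=
  ((row.zip (row.drop 1)).map (fun p => if p.2 ≠ p.1 then (1 : Int) else 0)).sum

def canonF (diagram : List (List String)) : List Int :=
  let w := (PySem.List.pyGetD diagram 0 []).length
  diagram.map canonRow
    ++ (PySem.List.pyRange 0 (w : Int) 1).map (fun j =>
        ((diagram.zip (diagram.drop 1)).map (fun p =>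
          if PySem.List.pyGetD p.2 j "" ≠ PySem.List.pyGetD p.1 j "" then (1 : Int) else 0)).sum)

-- ---------- A = canonF (unconditionally) ----------

theorem inc_fold {c : Int → Prop} [DecidablePred c] (i : Nat) :
    ∀ (js : List Int) (l : List Int), i < l.length →
    js.foldl (fun rt j => if c j then rt.set i (rt.getD i 0 + 1) else rt) l
      = l.set i (l.getD i 0 + (js.map (fun j => if c j then (1 : Int) else 0)).sum) := by
  intro js
  induction js with
  | nil =>
      intro l hl
      simp [List.getD_eq_getElem?_getD, List.getElem?_eq_getElem hl]
  | cons j js ih =>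
      intro l hl
      by_cases hc : c j
      · have hl' : i < (l.set i (l.getD i 0 + 1)).length := by simpa using hl
        simp only [List.foldl_cons, if_pos hc]
        rw [ih _ hl']
        rw [List.set_set]
        rw [List.getD_eq_getElem _ 0 hl', List.getElem_set_self]
        rw [List.getD_eq_getElem l 0 hl]
        simp [if_pos hc]
        ring_nf
      · simp only [List.foldl_cons, if_neg hc]
        rw [ih _ hl]
        simp [if_neg hc]

theorem rows_fold (F : List Int → (Int × List String) → List Int) (g : List String → Int)
    (HF : ∀ (rt : List Int) (p : Int × List String), 0 ≤ p.1 → p.1.toNat < rt.length →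
      F rt p = rt.set p.1.toNat (rt.getD p.1.toNat 0 + g p.2)) :
    ∀ (rows : List (List String)) (pre : List Int),
    (PySem.List.enumerate rows (pre.length : Int)).foldl F (pre ++ List.replicate rows.length 0)
      = pre ++ rows.map g := by
  intro rows
  induction rows with
  | nil => intro pre; simp [PySem.List.enumerate_nil]
  | cons row rows ih =>
      intro pre
      rw [PySem.List.enumerate_cons]
      simp only [List.foldl_cons, List.length_cons, List.replicate_succ]
      rw [HF _ _ (by positivity) (by simp)]
      have h1 : ((pre.length : Int)).toNat = pre.length := Int.toNat_natCast _
      rw [h1]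
      have h2 : (pre ++ (0 : Int) :: List.replicate rows.length 0).getD pre.length 0 = 0 := by
        simp [List.getD_eq_getElem?_getD]
      rw [h2]
      have h3 : (pre ++ (0 : Int) :: List.replicate rows.length 0).set pre.length (0 + g row)
          = (pre ++ [g row]) ++ List.replicate rows.length 0 := by
        rw [List.set_append_right _ _ (le_refl _)]
        simp
      rw [h3]
      have h4 : ((pre.length : Int) + 1) = (((pre ++ [g row]).length : Nat) : Int) := by
        simp
      rw [h4, ih (pre ++ [g row])]
      simp

theorem cols_fold (G : List Int → Int → List Int) (h : Int → Int)
    (HG : ∀ (ct : List Int) (j : Int), 0 ≤ j → j.toNat < ct.length →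
      G ct j = ct.set j.toNat (ct.getD j.toNat 0 + h j)) :
    ∀ (n : Nat) (pre : List Int),
    (PySem.List.pyRange (pre.length : Int) ((pre.length : Int) + n) 1).foldl G
        (pre ++ List.replicate n 0)
      = pre ++ (PySem.List.pyRange (pre.length : Int) ((pre.length : Int) + n) 1).map h := by
  intro n
  induction n with
  | zero =>
      intro pre
      rw [PySem.List.pyRange_one_eq_nil (by simp)]
      simp
  | succ n ih =>
      intro pre
      rw [PySem.List.pyRange_one_cons (by push_cast; omega)]
      simp only [List.foldl_cons, List.replicate_succ, List.map_cons]
      rw [HG _ _ (by positivity) (by simp [Int.toNat_natCast])]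
      rw [Int.toNat_natCast]
      have h2 : (pre ++ (0 : Int) :: List.replicate n 0).getD pre.length 0 = 0 := by
        simp [List.getD_eq_getElem?_getD]
      rw [h2]
      have h3 : (pre ++ (0 : Int) :: List.replicate n 0).set pre.length (0 + h pre.length)
          = (pre ++ [h pre.length]) ++ List.replicate n 0 := by
        rw [List.set_append_right _ _ (le_refl _)]
        simp
      rw [h3]
      have h5 : (((pre ++ [h (pre.length : Int)]).length : Nat) : Int) + (n : Int) = (pre.length : Int) + ((n + 1 : Nat) : Int) := by
        simp only [List.length_append, List.length_cons, List.length_nil]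
        push_cast; ring
      have h4 : (((pre ++ [h (pre.length : Int)]).length : Nat) : Int) = (pre.length : Int) + 1 := by
        simp
      have hih := ih (pre ++ [h (pre.length : Int)])
      rw [h5, h4] at hih
      rw [hih]
      simp [List.append_assoc]

theorem adj_pairs {α β : Type} (l : List α) (d : α) (f : α → α → β) :
    (PySem.List.pyRange 1 (l.length : Int) 1).map
        (fun i => f (PySem.List.pyGetD l i d) (PySem.List.pyGetD l (i-1) d))
      = (l.zip (l.drop 1)).map (fun p => f p.2 p.1) := by
  apply List.ext_getElem
  · simp [PySem.List.length_pyRange_one]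
  · intro k h1 h2
    have hk : k < l.length - 1 := by
      simpa [PySem.List.length_pyRange_one] using h1
    have hrange : (PySem.List.pyRange 1 (l.length : Int) 1)[k]'(by simpa [PySem.List.length_pyRange_one] using h1) = 1 + k :=
      PySem.List.getElem_pyRange_one _ _ _ _
    simp only [List.getElem_map, hrange, List.getElem_zip, List.getElem_drop]
    have e1 : PySem.List.pyGetD l (1 + (k : Int)) d = l[1 + k]'(by omega) := by
      rw [show ((1 : Int) + (k : Int)) = ((1 + k : Nat) : Int) by push_cast; ring]
      rw [PySem.List.pyGetD_eq_getElem _ _ _ (by omega)]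
      congr 1
      omega
    have e2 : PySem.List.pyGetD l (1 + (k : Int) - 1) d = l[k]'(by omega) := by
      rw [show ((1 : Int) + (k : Int) - 1) = ((k : Nat) : Int) by ring]
      rw [PySem.List.pyGetD_eq_getElem _ _ _ (by omega)]
      congr 1
      omega
    rw [e1, e2]

theorem a_eq_canon (diagram : List (List String)) :
    count_color_transitions diagram = canonF diagram := by
  simp only [count_color_transitions, canonF]
  congr 1
  · have H := rows_fold
      (fun rt p => (PySem.List.pyRange 1 (p.2.length : Int) 1).foldl (fun rt j =>
        if PySem.List.pyGetD p.2 j "" ≠ PySem.List.pyGetD p.2 (j-1) "" then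
          rt.set p.1.toNat (rt.getD p.1.toNat 0 + 1) else rt) rt)
      (fun row => ((PySem.List.pyRange 1 (row.length : Int) 1).map (fun j =>
        if PySem.List.pyGetD row j "" ≠ PySem.List.pyGetD row (j-1) "" then (1 : Int) else 0)).sum)
      (fun rt p _ hlt => inc_fold _ _ _ hlt) diagram []
    simp only [List.length_nil, Nat.cast_zero, List.nil_append] at H
    rw [H]
    apply List.map_congr_left
    intro row _
    simp only [canonRow]
    rw [adj_pairs row "" (fun a b => if a ≠ b then (1 : Int) else 0)]
  · have H := cols_fold
      (fun ct j => (PySem.List.pyRange 1 (diagram.length : Int) 1).foldl (fun ct i =>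
        if PySem.List.pyGetD (PySem.List.pyGetD diagram i []) j "" ≠
           PySem.List.pyGetD (PySem.List.pyGetD diagram (i-1) []) j "" then
          ct.set j.toNat (ct.getD j.toNat 0 + 1) else ct) ct)
      (fun j => ((PySem.List.pyRange 1 (diagram.length : Int) 1).map (fun i =>
        if PySem.List.pyGetD (PySem.List.pyGetD diagram i []) j "" ≠
           PySem.List.pyGetD (PySem.List.pyGetD diagram (i-1) []) j "" then (1 : Int) else 0)).sum)
      (fun ct j _ hlt => inc_fold _ _ _ hlt)
      (PySem.List.pyGetD diagram 0 []).length []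
    simp only [List.length_nil, Nat.cast_zero, zero_add, List.nil_append] at H
    rw [H]
    apply List.map_congr_left
    intro j _
    rw [adj_pairs diagram []
      (fun a b => if PySem.List.pyGetD a j "" ≠ PySem.List.pyGetD b j "" then (1 : Int) else 0)]

-- ---------- B = canonF (under Pre_) ----------

-- value of the row counter: rowFrom p l continues the row count with previous cell p
def rowFrom (p : Option String) : List String → Int
  | [] => 0
  | c :: rest =>
      (match p with | some pc => if c ≠ pc then (1 : Int) else 0 | none => 0) + rowFrom (some c) rest

def lastO (p : Option String) : List String → Option String
  | [] => p
  | c :: rest => lastO (some c) rest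

-- projection of bInnerStep onto the col_t component
def ctStep (w : Nat) (prev : Option (List String)) (ct : List Int) (it : Int × String) : List Int :=
  match prev with
  | some pr =>
      if it.1 < (w : Int) ∧ it.2 ≠ PySem.List.pyGetD pr it.1 "" then
        ct.set it.1.toNat (ct.getD it.1.toNat 0 + 1)
      else ct
  | none => ct

theorem inner_char (w : Nat) (prev : Option (List String)) :
    ∀ (l : List String) (j0 : Int) (r : Int) (p : Option String) (ct : List Int),
    (PySem.List.enumerate l j0).foldl (bInnerStep w prev) (r, p, ct)
      = (r + rowFrom p l, lastO p l, (PySem.List.enumerate l j0).foldl (ctStep w prev) ct) := by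
  intro l
  induction l with
  | nil => intro j0 r p ct; simp [PySem.List.enumerate_nil, rowFrom, lastO]
  | cons c rest ih =>
      intro j0 r p ct
      rw [PySem.List.enumerate_cons]
      simp only [List.foldl_cons]
      have hb : bInnerStep w prev (r, p, ct) (j0, c)
          = ((match p with | some pc => if c ≠ pc then r + 1 else r | none => r),
             some c, ctStep w prev ct (j0, c)) := by
        simp [bInnerStep, ctStep]
      rw [hb, ih]
      simp only [rowFrom, lastO]
      cases p with
      | none => simp
      | some pc =>
          by_cases hc : c ≠ pc <;> simp [hc] <;> ring

theorem ct_noop (w : Nat) (pr : List String) :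
    ∀ (l : List String) (j0 : Int) (ct : List Int), (w : Int) ≤ j0 →
    (PySem.List.enumerate l j0).foldl (ctStep w (some pr)) ct = ct := by
  intro l
  induction l with
  | nil => intro j0 ct _; simp [PySem.List.enumerate_nil]
  | cons c rest ih =>
      intro j0 ct hj
      rw [PySem.List.enumerate_cons]
      simp only [List.foldl_cons]
      have : ctStep w (some pr) ct (j0, c) = ct := by
        simp only [ctStep]
        rw [if_neg]
        intro h
        omega
      rw [this, ih (j0 + 1) ct (by omega)]

theorem ct_none (w : Nat) : ∀ (l : List (Int × String)) (ct : List Int),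
    l.foldl (ctStep w none) ct = ct := by
  intro l
  induction l with
  | nil => intro ct; simp
  | cons x rest ih => intro ct; simp only [List.foldl_cons, ctStep]; exact ih _

theorem ct_fold (w : Nat) (pr : List String) (hpr : w ≤ pr.length) :
    ∀ (l : List String) (ct1 ct2 : List Int),
    ct1.length + ct2.length = w → ct2.length ≤ l.length →
    (PySem.List.enumerate l (ct1.length : Int)).foldl (ctStep w (some pr)) (ct1 ++ ct2)
      = ct1 ++ List.zipWith (fun x (q : String × String) => x + if q.1 ≠ q.2 then (1 : Int) else 0)
          ct2 (l.zip (pr.drop ct1.length)) := by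
  intro l
  induction l with
  | nil =>
      intro ct1 ct2 hw hlen
      have : ct2 = [] := List.eq_nil_of_length_eq_zero (Nat.le_zero.mp (by simpa using hlen))
      subst this
      simp [PySem.List.enumerate_nil]
  | cons c rest ih =>
      intro ct1 ct2 hw hlen
      cases ct2 with
      | nil =>
          rw [ct_noop w pr (c :: rest) (ct1.length : Int) (ct1 ++ []) (by simp at hw; omega)]
          simp
      | cons x ct2' =>
          rw [PySem.List.enumerate_cons]
          simp only [List.foldl_cons]
          have hj : (ct1.length : Int) < (w : Int) := by
            have : ct1.length < w := by simp at hw; omega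
            exact_mod_cast this
          have hprd : pr.drop ct1.length = pr[ct1.length]'(by simp at hw; omega) :: pr.drop (ct1.length + 1) := by
            rw [List.drop_eq_getElem_cons]
          have hgetpr : PySem.List.pyGetD pr (ct1.length : Int) "" = pr[ct1.length]'(by simp at hw; omega) := by
            rw [PySem.List.pyGetD_natCast]
            exact List.getD_eq_getElem _ _ _
          have hstep : ctStep w (some pr) (ct1 ++ x :: ct2') ((ct1.length : Int), c)
              = (ct1 ++ [x + if c ≠ pr[ct1.length]'(by simp at hw; omega) then (1 : Int) else 0]) ++ ct2' := by
            simp only [ctStep, hgetpr]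
            by_cases hc : c ≠ pr[ct1.length]'(by simp at hw; omega)
            · rw [if_pos ⟨hj, hc⟩, Int.toNat_natCast]
              have hg : (ct1 ++ x :: ct2').getD ct1.length 0 = x := by
                simp [List.getD_eq_getElem?_getD]
              rw [hg, List.set_append_right _ _ (le_refl _)]
              simp [hc]
            · rw [if_neg (by tauto)]
              push_neg at hc
              simp [hc]
          rw [hstep]
          have hlen1 : ((ct1 ++ [x + if c ≠ pr[ct1.length]'(by simp at hw; omega) then (1 : Int) else 0]).length : Int) = (ct1.length : Int) + 1 := by simp
          rw [show ((ct1.length : Int) + 1) = ((ct1 ++ [x + if c ≠ pr[ct1.length]'(by simp at hw; omega) then (1 : Int) else 0]).length : Int) from hlen1.symm]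
          rw [ih _ ct2' (by simp at hw ⊢; omega) (by simp at hlen ⊢; omega)]
          simp only [List.length_append, List.length_cons, List.length_nil]
          rw [hprd]
          simp only [List.zip_cons_cons, List.zipWith_cons_cons, List.append_assoc,
            List.singleton_append]


-- fold of ct over the consecutive row pairs
def colsAdd : List Int → List String → List (List String) → List Int
  | ct, _, [] => ct
  | ct, pr, row :: rest =>
      colsAdd (List.zipWith (fun x (q : String × String) => x + if q.1 ≠ q.2 then (1 : Int) else 0)
        ct (row.zip pr)) row rest

theorem colsAdd_length : ∀ (rest : List (List String)) (pr : List String) (ct : List Int),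
    (∀ r ∈ rest, ct.length ≤ r.length) → (ct.length ≤ pr.length) →
    (colsAdd ct pr rest).length = ct.length := by
  intro rest
  induction rest with
  | nil => intro pr ct _ _; rfl
  | cons row rest ih =>
      intro pr ct hr hp
      simp only [colsAdd]
      have hlen : (List.zipWith (fun x (q : String × String) => x + if q.1 ≠ q.2 then (1 : Int) else 0)
          ct (row.zip pr)).length = ct.length := by
        simp only [List.length_zipWith, List.length_zip]
        have h1 := hr row (by simp)
        omega
      rw [ih row _ (by rw [hlen]; intro r hrm; exact hr r (by simp [hrm])) (by rw [hlen]; exact hr row (by simp))]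
      exact hlen

theorem colsAdd_get : ∀ (rest : List (List String)) (pr : List String) (ct : List Int)
    (hr : ∀ r ∈ rest, ct.length ≤ r.length) (hp : ct.length ≤ pr.length)
    (k : Nat) (hk : k < ct.length),
    (colsAdd ct pr rest)[k]'(by rw [colsAdd_length rest pr ct hr hp]; exact hk)
      = ct[k] + (((pr :: rest).zip rest).map (fun p =>
          if PySem.List.pyGetD p.2 (k : Int) "" ≠ PySem.List.pyGetD p.1 (k : Int) "" then (1 : Int) else 0)).sum := by
  intro rest
  induction rest with
  | nil => intro pr ct _ _ k hk; simp [colsAdd]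
  | cons row rest ih =>
      intro pr ct hr hp k hk
      simp only [colsAdd]
      have hrow : ct.length ≤ row.length := hr row (by simp)
      have hlen : (List.zipWith (fun x (q : String × String) => x + if q.1 ≠ q.2 then (1 : Int) else 0)
          ct (row.zip pr)).length = ct.length := by
        simp only [List.length_zipWith, List.length_zip]; omega
      have hkx : k < (List.zipWith (fun x (q : String × String) => x + if q.1 ≠ q.2 then (1 : Int) else 0)
          ct (row.zip pr)).length := by omega
      rw [ih row _ (by rw [hlen]; intro r hrm; exact hr r (by simp [hrm])) (by rw [hlen]; exact hrow) k (by omega)]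
      have hget : (List.zipWith (fun x (q : String × String) => x + if q.1 ≠ q.2 then (1 : Int) else 0)
          ct (row.zip pr))[k]'hkx
          = ct[k] + (if row[k]'(by omega) ≠ pr[k]'(by omega) then (1 : Int) else 0) := by
        simp [List.getElem_zipWith, List.getElem_zip]
      rw [hget]
      have e1 : PySem.List.pyGetD row (k : Int) "" = row[k]'(by omega) := by
        rw [PySem.List.pyGetD_natCast]
        exact List.getD_eq_getElem _ _ _
      have e2 : PySem.List.pyGetD pr (k : Int) "" = pr[k]'(by omega) := by
        rw [PySem.List.pyGetD_natCast]
        exact List.getD_eq_getElem _ _ _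
      simp only [List.zip_cons_cons, List.map_cons, List.sum_cons, e1, e2]
      ring

theorem outer_char (w : Nat) :
    ∀ (rows : List (List String)) (pr : List String) (rt ct : List Int),
    ct.length = w → w ≤ pr.length → (∀ r ∈ rows, w ≤ r.length) →
    rows.foldl (fun st row =>
        (some row,
         st.2.1 ++ [((PySem.List.enumerate row 0).foldl (bInnerStep w st.1) (0, none, st.2.2)).1],
         ((PySem.List.enumerate row 0).foldl (bInnerStep w st.1) (0, none, st.2.2)).2.2)) (some pr, rt, ct)
      = (some (rows.getLastD pr), rt ++ rows.map (rowFrom none), colsAdd ct pr rows) := by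
  intro rows
  induction rows with
  | nil => intro pr rt ct _ _ _; simp [colsAdd]
  | cons row rest ih =>
      intro pr rt ct hct hpr hrows
      simp only [List.foldl_cons]
      have hrow : w ≤ row.length := hrows row (by simp)
      have hinner := inner_char w (some pr) row 0 0 none ct
      have hctf := ct_fold w pr hpr row [] ct (by simpa using hct) (by omega)
      simp only [List.length_nil, Nat.cast_zero, List.nil_append] at hctf
      rw [hinner]
      simp only [zero_add]
      rw [hctf]
      rw [ih row _ _ (by simp only [List.length_zipWith, List.length_zip, List.length_drop]; omega)
        (by omega) (by intro r hr; exact hrows r (by simp [hr]))]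
      simp only [colsAdd, Prod.mk.injEq, List.append_assoc, List.singleton_append]
      refine ⟨?_, ?_, ?_⟩
      · cases rest with
        | nil => simp
        | cons h t =>
            obtain ⟨a, ha⟩ := Option.isSome_iff_exists.mp ((List.getLast?_isSome).mpr (List.cons_ne_nil h t))
            simp [ha]
      · simp
      · rw [List.drop_zero]

theorem rowFrom_some_eq (l : List String) : ∀ (pc : String),
    rowFrom (some pc) l = (((pc :: l).zip l).map (fun p => if p.2 ≠ p.1 then (1 : Int) else 0)).sum := by
  induction l with
  | nil => intro pc; simp [rowFrom]
  | cons c rest ih =>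
      intro pc
      simp only [rowFrom, List.zip_cons_cons, List.map_cons, List.sum_cons, ih c]

theorem rowFrom_eq_canonRow (row : List String) : rowFrom none row = canonRow row := by
  cases row with
  | nil => simp [rowFrom, canonRow]
  | cons c rest =>
      simp only [rowFrom, canonRow, List.drop_one, List.tail_cons, zero_add]
      rw [rowFrom_some_eq rest c]

theorem b_eq_canon (diagram : List (List String)) (hpre : Pre_count_color_transitions diagram) :
    count_color_transitions_alt diagram = canonF diagram := by
  obtain ⟨hne, hlen⟩ := hpre
  obtain ⟨d0, rest, rfl⟩ := List.exists_cons_of_ne_nil hne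
  simp only [count_color_transitions_alt, canonF]
  have hget0 : PySem.List.pyGetD (d0 :: rest) 0 [] = d0 := PySem.List.pyGetD_zero_cons _ _ _
  rw [hget0]
  have hhead : (d0 :: rest).headD [] = d0 := rfl
  rw [hhead] at hlen
  set w := d0.length with hw
  -- first iteration: prev = none
  simp only [List.foldl_cons]
  have h1 := inner_char w none d0 0 0 none (List.replicate w (0 : Int))
  rw [h1]
  rw [ct_none w (PySem.List.enumerate d0 0) (List.replicate w (0 : Int))]
  simp only [zero_add, List.nil_append]
  rw [outer_char w rest d0 [rowFrom none d0] (List.replicate w 0)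
    (by simp) (le_of_eq hw.symm) (by intro r hr; exact hlen r (by simp [hr]))]
  congr 1
  · -- row part
    simp only [List.map_cons, List.singleton_append]
    congr 1
    · -- rowFrom none = canonRow, for d0 and each row of rest
      exact rowFrom_eq_canonRow d0
    · exact List.map_congr_left (fun r _ => rowFrom_eq_canonRow r)
  · -- column part
    apply List.ext_getElem
    · rw [colsAdd_length rest d0 _ (by intro r hr; simp only [List.length_replicate]; exact hlen r (by simp [hr])) (by simp [hw])]
      simp [PySem.List.length_pyRange_one]
    · intro k h1 h2
      have hkw : k < w := by
        have := h1
        rw [colsAdd_length rest d0 _ (by intro r hr; simp only [List.length_replicate]; exact hlen r (by simp [hr])) (by simp [hw])] at this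
        simpa using this
      rw [colsAdd_get rest d0 _ (by intro r hr; simp only [List.length_replicate]; exact hlen r (by simp [hr])) (by simp [hw]) k (by simpa using hkw)]
      have hrng : (PySem.List.pyRange 0 (w : Int) 1)[k]'(by simpa [PySem.List.length_pyRange_one] using hkw) = 0 + (k : Int) :=
        PySem.List.getElem_pyRange_one _ _ _ _
      simp only [List.getElem_map, hrng, zero_add]
      simp [List.getElem_replicate]

-- ===== VERDICT (by name: the statement is the Claim_ definition above) =====
theorem count_color_transitions_spec : Claim_equal_count_color_transitions := by
  intro diagram _ hpre
  show count_color_transitions diagram = count_color_transitions_alt diagram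
  rw [a_eq_canon, b_eq_canon diagram hpre]
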